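-- pv_equiv track=rewrite | github.com/ravshan7700/LeetCode | Easy/3-masala.py | dublikat
-- ===== SOURCE A (Python) =====
-- def dublikat(st: str):
--     ls=[]
--     ls2=[]
--     for i in st:
--         if i not in ls:
--             ls.append(i)
--             ls2.append(i)
--         else:
--             ls.append(i)
--             ls2.append(f"{i}_{ls.count(i)-1}")
--
--
--     return ls2
-- ===== SOURCE B (Python) =====
-- def dublikat(st: str):
--     pos = {}
--     for i, c in enumerate(st):
--         pos.setdefault(c, []).append(i)
--     res = [""] * len(st)
--     for c, ps in pos.items():
--         for r, p in enumerate(ps):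
--             res[p] = c if r == 0 else f"{c}_{r}"
--     return res
-- ===== Notes on version B (the rewrite author's own statement) =====
-- stated objective: faster
-- what changed: Replaced A's single running pass (linear membership test and count on the ever-growing seen-list per character) by a two-stage group-and-scatter: build a dict mapping each character to its list of positions, then write label(c, rank) into a preallocated result at each stored position.
import Mathlib
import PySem

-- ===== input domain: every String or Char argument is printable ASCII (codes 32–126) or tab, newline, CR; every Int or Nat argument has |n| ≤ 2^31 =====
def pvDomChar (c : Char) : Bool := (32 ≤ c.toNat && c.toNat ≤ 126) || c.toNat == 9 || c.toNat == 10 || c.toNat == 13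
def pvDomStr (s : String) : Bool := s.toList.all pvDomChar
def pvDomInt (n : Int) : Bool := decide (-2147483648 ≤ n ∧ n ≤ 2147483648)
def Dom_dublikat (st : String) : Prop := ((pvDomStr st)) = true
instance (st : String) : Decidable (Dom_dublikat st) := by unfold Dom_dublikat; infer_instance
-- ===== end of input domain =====

-- B replaces A's single running pass (linear membership test and count on the growing
-- seen-list) by a two-stage group-and-scatter: build a char -> positions dict, then write
-- each label into a preallocated result at its stored position (measured faster).

-- ===== PORT A =====
def dublikat (st : String) : List String :=
  (st.toList.foldl
    (fun (s : List Char × List String) (i : Char) =>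
      if i ∉ s.1 then
        (s.1 ++ [i], s.2 ++ [String.ofList [i]])
      else
        -- f"{i}_{ls.count(i)-1}" after ls.append(i)
        (s.1 ++ [i],
         s.2 ++ [String.ofList ([i] ++ '_' ::
           (PySem.Int.toStr ((PySem.List.count (s.1 ++ [i]) i : Int) - 1)).toList)]))
    ([], [])).2

-- ===== PORT B =====
def dublikat_alt (st : String) : List String :=
  -- pos = {}; for i, c in enumerate(st): pos.setdefault(c, []).append(i)
  let cs := st.toList
  let pos : PySem.Dict Char (List Int) :=
    (PySem.List.enumerate cs 0).foldl
      (fun d p => d.modify p.2 ([] : List Int) (· ++ [p.1])) PySem.Dict.empty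
  -- res = [""] * len(st); for c, ps in pos.items(): for r, p in enumerate(ps): res[p] = …
  pos.items.foldl
    (fun r g =>
      (PySem.List.enumerate g.2 0).foldl
        (fun r q => PySem.List.pySetD r q.2
          (if q.1 = 0 then String.ofList [g.1]
           else String.ofList ([g.1] ++ '_' :: (PySem.Int.toStr q.1).toList))) r)
    (PySem.List.pyRepeat [""] ((cs.length : Int)))

-- ===== PRECONDITION & SPEC =====
def Spec_dublikat (st : String) (out : List String) : Prop := out = dublikat_alt st
instance (st : String) (out : List String) : Decidable (Spec_dublikat st out) := by unfold Spec_dublikat; infer_instance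

-- ===== CLAIM (what is proved, stated in full; the proofs are below) =====
def Claim_equal_dublikat : Prop := ∀ (st : String), Dom_dublikat st → Spec_dublikat st (dublikat st)

-- ===== LEMMAS AND PROOFS =====

-- the label attached at a position whose char is c and whose rank among equal chars is k
def pvLabel (c : Char) (k : Int) : String :=
  if k = 0 then String.ofList [c]
  else String.ofList ([c] ++ '_' :: (PySem.Int.toStr k).toList)

-- A-side reference recursion: labels of t after the already-seen prefix pfx
def pvGo (pfx t : List Char) : List String :=
  match t with
  | [] => []
  | c :: t => pvLabel c ((pfx.count c : Int)) :: pvGo (pfx ++ [c]) t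

lemma dublikat_fold_inv (t : List Char) : ∀ (pfx : List Char) (out : List String),
    (t.foldl
      (fun (s : List Char × List String) (i : Char) =>
        if i ∉ s.1 then
          (s.1 ++ [i], s.2 ++ [String.ofList [i]])
        else
          (s.1 ++ [i],
           s.2 ++ [String.ofList ([i] ++ '_' ::
             (PySem.Int.toStr ((PySem.List.count (s.1 ++ [i]) i : Int) - 1)).toList)]))
      (pfx, out)).2 = out ++ pvGo pfx t := by
  induction t with
  | nil => intro pfx out; simp [pvGo]
  | cons c t ih =>
    intro pfx out
    by_cases hc : c ∈ pfx
    · have h1 : pfx.count c ≠ 0 := by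
        simpa [List.count_eq_zero] using hc
      have h2 : ((PySem.List.count (pfx ++ [c]) c : Int) - 1) = (pfx.count c : Int) := by
        simp [PySem.List.count_eq, List.count_append]
      simp only [List.foldl_cons]
      rw [if_neg (by simp [hc]), ih, h2]
      simp [pvGo, pvLabel, h1]
    · have h1 : pfx.count c = 0 := List.count_eq_zero.mpr hc
      simp only [List.foldl_cons]
      rw [if_pos hc, ih]
      simp [pvGo, pvLabel, h1]

lemma pvGo_length (t : List Char) : ∀ pfx, (pvGo pfx t).length = t.length := by
  induction t with
  | nil => intro pfx; simp [pvGo]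
  | cons c t ih => intro pfx; simp [pvGo, ih]

lemma pvGo_getElem? (t : List Char) : ∀ (pfx : List Char) (j : Nat) (h : j < t.length),
    (pvGo pfx t)[j]? = some (pvLabel (t[j]) (((pfx ++ t.take j).count t[j] : Int))) := by
  induction t with
  | nil => intro pfx j h; simp at h
  | cons c t ih =>
    intro pfx j h
    cases j with
    | zero => simp only [pvGo, List.getElem?_cons_zero, List.getElem_cons_zero,
        List.take_zero, List.append_nil]
    | succ j =>
      have h' : j < t.length := by simpa using h
      have := ih (pfx ++ [c]) j h'
      simp only [pvGo, List.getElem?_cons_succ, this, List.getElem_cons_succ,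
        List.take_succ_cons]
      rw [List.append_assoc]
      rfl

-- B-side: the positions list the dict stores for character c (enumerate start s)
def pvQ (s : Nat) (t : List Char) (c : Char) : List Int :=
  ((PySem.List.enumerate t (s : Int)).filter (fun p => p.2 == c)).map (·.1)

lemma pvQ_nil (s : Nat) (c : Char) : pvQ s [] c = [] := by
  simp [pvQ, PySem.List.enumerate_nil]

lemma pvQ_cons (s : Nat) (x : Char) (t : List Char) (c : Char) :
    pvQ s (x :: t) c = (if x = c then [(s : Int)] else []) ++ pvQ (s + 1) t c := by
  have hc : ((s : Int) + 1) = ((s + 1 : Nat) : Int) := by push_cast; ring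
  simp only [pvQ, PySem.List.enumerate_cons, hc, List.filter_cons]
  by_cases hx : x = c
  · simp [hx]
  · simp [hx]

lemma pos_getD (cs : List Char) (c : Char) :
    (((PySem.List.enumerate cs 0).foldl
      (fun d p => d.modify p.2 ([] : List Int) (· ++ [p.1])) PySem.Dict.empty).getD c [])
      = pvQ 0 cs c := by
  have hswap : (PySem.List.enumerate cs 0).foldl
      (fun d p => d.modify p.2 ([] : List Int) (· ++ [p.1])) PySem.Dict.empty
      = ((PySem.List.enumerate cs 0).map Prod.swap).foldl
        (fun d p => d.modify p.1 ([] : List Int) (· ++ [p.2])) PySem.Dict.empty := by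
    rw [List.foldl_map]
    rfl
  rw [hswap, PySem.Dict.getD_foldl_modify_append]
  simp [pvQ, List.filter_map, List.map_map, Function.comp_def, PySem.Dict.getD_empty]

lemma pos_keys (cs : List Char) :
    (((PySem.List.enumerate cs 0).foldl
      (fun d p => d.modify p.2 ([] : List Int) (· ++ [p.1])) PySem.Dict.empty)).keys
      = PySem.Set.ofList cs := by
  rw [PySem.Dict.keys_foldl_modify_key
    (key := fun p : Int × Char => p.2) (f := fun d p => (· ++ [p.1]))]
  simp [PySem.Dict.keys_empty, PySem.List.map_snd_enumerate, PySem.Set.ofList_eq_foldl,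
    PySem.Set.update]

lemma pos_nodup (cs : List Char) :
    (((PySem.List.enumerate cs 0).foldl
      (fun d p => d.modify p.2 ([] : List Int) (· ++ [p.1])) PySem.Dict.empty)).keys.Nodup := by
  exact PySem.Dict.nodup_keys_foldl_modify_key _ _ _ _ _ PySem.Dict.nodup_keys_empty

lemma pos_items (cs : List Char) :
    (((PySem.List.enumerate cs 0).foldl
      (fun d p => d.modify p.2 ([] : List Int) (· ++ [p.1])) PySem.Dict.empty)).items
      = (PySem.Set.ofList cs).map (fun c => (c, pvQ 0 cs c)) := by
  rw [PySem.Dict.items_eq_map_keys _ (pos_nodup cs) ([] : List Int), pos_keys]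
  exact List.map_congr_left (fun c _ => by rw [pos_getD])

-- rank property: the j-th stored position of c is an index q with char c and prefix count j
lemma pvQ_rank (c : Char) : ∀ (t : List Char) (s j : Nat), j < (pvQ s t c).length →
    ∃ q : Nat, q < t.length ∧ (pvQ s t c)[j]? = some ((s + q : Nat) : Int) ∧
      t[q]? = some c ∧ (t.take q).count c = j := by
  intro t
  induction t with
  | nil => intro s j h; rw [pvQ_nil] at h; simp at h
  | cons x t ih =>
    intro s j h
    rw [pvQ_cons] at h ⊢
    by_cases hx : x = c
    · rw [if_pos hx] at h ⊢
      cases j with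
      | zero =>
        exact ⟨0, by simp, by simp, by simp [hx], by simp⟩
      | succ j =>
        have h' : j < (pvQ (s + 1) t c).length := by simpa using h
        obtain ⟨q, hq, he, hc2, hcnt⟩ := ih (s + 1) j h'
        refine ⟨q + 1, by simpa using hq, ?_, by simpa using hc2, ?_⟩
        · rw [List.cons_append, List.getElem?_cons_succ, List.nil_append, he]
          norm_num [Nat.add_assoc, Nat.add_comm 1 q]
        · simp [List.take_succ_cons, hx, hcnt]
    · rw [if_neg hx] at h ⊢
      obtain ⟨q, hq, he, hc2, hcnt⟩ := ih (s + 1) j (by simpa using h)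
      refine ⟨q + 1, by simpa using hq, ?_, by simpa using hc2, ?_⟩
      · rw [List.nil_append, he]
        norm_num [Nat.add_assoc, Nat.add_comm 1 q]
      · simp [List.take_succ_cons, hx, hcnt]

lemma pvQ_mem (cs : List Char) (q : Nat) (h : q < cs.length) :
    ((q : Nat) : Int) ∈ pvQ 0 cs (cs[q]) := by
  have : ((0 : Int) + (q : Nat), cs[q]) ∈ PySem.List.enumerate cs 0 :=
    (PySem.List.mem_enumerate_iff _ _ _).2 ⟨q, h, rfl⟩
  simp only [pvQ, List.mem_map, List.mem_filter]
  exact ⟨(((0:Int) + (q : Nat)), cs[q]), ⟨this, by simp⟩, by simp⟩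

-- scatter: a fold of pySetD writes
lemma scatter_length (ws : List (Int × String)) : ∀ (r : List String),
    (ws.foldl (fun r w => PySem.List.pySetD r w.1 w.2) r).length = r.length := by
  induction ws with
  | nil => intro r; rfl
  | cons w ws ih => intro r; rw [List.foldl_cons, ih, PySem.List.length_pySetD]

lemma scatter_getElem? (f : Nat → String) : ∀ (ws : List (Int × String)) (r : List String),
    (∀ w ∈ ws, ∃ q : Nat, w.1 = (q : Int) ∧ q < r.length ∧ w.2 = f q) →
    ∀ (q : Nat) (h : q < r.length),
      (ws.foldl (fun r w => PySem.List.pySetD r w.1 w.2) r)[q]?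
        = some (if (∃ w ∈ ws, w.1 = (q : Int)) then f q else r[q]) := by
  intro ws
  induction ws with
  | nil => intro r hg q h; simp [List.getElem?_eq_getElem h]
  | cons w ws ih =>
    intro r hg q h
    obtain ⟨qw, hw1, hwlt, hw2⟩ := hg w (List.mem_cons_self)
    have hset : PySem.List.pySetD r w.1 w.2 = r.set qw (f qw) := by
      rw [hw1, hw2, PySem.List.pySetD_natCast]
    have hlen : (r.set qw (f qw)).length = r.length := by simp
    have hg' : ∀ w' ∈ ws, ∃ q' : Nat, w'.1 = (q' : Int) ∧ q' < (r.set qw (f qw)).length ∧ w'.2 = f q' := by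
      intro w' hw'
      obtain ⟨q', h1, h2, h3⟩ := hg w' (List.mem_cons_of_mem _ hw')
      exact ⟨q', h1, by rwa [hlen], h3⟩
    rw [List.foldl_cons, hset, ih (r.set qw (f qw)) hg' q (by rwa [hlen])]
    by_cases hmem : ∃ w' ∈ ws, w'.1 = (q : Int)
    · obtain ⟨w', hw', he'⟩ := hmem
      rw [if_pos ⟨w', hw', he'⟩, if_pos ⟨w', List.mem_cons_of_mem _ hw', he'⟩]
    · rw [if_neg hmem]
      by_cases hq : qw = q
      · subst hq
        rw [List.getElem_set_self (by simpa using hwlt), if_pos ⟨w, List.mem_cons_self, hw1⟩]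
      · rw [List.getElem_set_ne hq]
        rw [if_neg ?_]
        rintro ⟨w', hw', he⟩
        rcases List.mem_cons.1 hw' with rfl | hmem'
        · exact hq (by exact_mod_cast hw1.symm.trans he)
        · exact hmem ⟨w', hmem', he⟩

-- proof-only helpers: the write list each dict group produces, and the intended label at index q
def pvWr (g : Char × List Int) : List (Int × String) :=
  (PySem.List.enumerate g.2 0).map (fun q => (q.2,
    if q.1 = 0 then String.ofList [g.1]
    else String.ofList ([g.1] ++ '_' :: (PySem.Int.toStr q.1).toList)))

def pvF (cs : List Char) (q : Nat) : String :=
  pvLabel (cs.getD q ' ') (((cs.take q).count (cs.getD q ' ') : Int))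

lemma dublikat_alt_eq (st : String) :
    dublikat_alt st =
      (((((PySem.List.enumerate st.toList 0).foldl
          (fun d p => d.modify p.2 ([] : List Int) (· ++ [p.1]))
          PySem.Dict.empty).items.map pvWr).flatten).foldl
        (fun r w => PySem.List.pySetD r w.1 w.2)
        (PySem.List.pyRepeat [""] ((st.toList.length : Int)))) := by
  have h0 : dublikat_alt st =
      ((PySem.List.enumerate st.toList 0).foldl
        (fun d p => d.modify p.2 ([] : List Int) (· ++ [p.1]))
        PySem.Dict.empty).items.foldl
        (fun r g =>
          (PySem.List.enumerate g.2 0).foldl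
            (fun r q => PySem.List.pySetD r q.2
              (if q.1 = 0 then String.ofList [g.1]
               else String.ofList ([g.1] ++ '_' :: (PySem.Int.toStr q.1).toList))) r)
        (PySem.List.pyRepeat [""] ((st.toList.length : Int))) := rfl
  rw [h0, List.foldl_flatten, List.foldl_map]
  exact PySem.List.foldl_congr_mem _ _ _ _ (fun acc g _ => by
    simp only [pvWr, List.foldl_map])

lemma dublikat_eq (st : String) : dublikat st = pvGo [] st.toList := by
  unfold dublikat
  rw [dublikat_fold_inv st.toList [] [], List.nil_append]

-- ===== VERDICT (by name: the statement is the Claim_ definition above) =====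
theorem dublikat_spec : Claim_equal_dublikat := by
  intro st _
  unfold Spec_dublikat
  rw [dublikat_eq st, dublikat_alt_eq st]
  generalize st.toList = cs
  have hr0 : (PySem.List.pyRepeat [""] ((cs.length : Int))).length = cs.length := by
    simp [PySem.List.pyRepeat_singleton]
  have hitems : (((PySem.List.enumerate cs 0).foldl
      (fun d p => d.modify p.2 ([] : List Int) (· ++ [p.1])) PySem.Dict.empty)).items
      = (PySem.Set.ofList cs).map (fun c => (c, pvQ 0 cs c)) := pos_items cs
  have hgood : ∀ w ∈ (((((PySem.List.enumerate cs 0).foldl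
      (fun d p => d.modify p.2 ([] : List Int) (· ++ [p.1]))
      PySem.Dict.empty).items.map pvWr).flatten)),
      ∃ q : Nat, w.1 = (q : Int) ∧
        q < (PySem.List.pyRepeat [""] ((cs.length : Int))).length ∧ w.2 = pvF cs q := by
    intro w hw
    rw [List.mem_flatten] at hw
    obtain ⟨s, hs, hws⟩ := hw
    rw [List.mem_map] at hs
    obtain ⟨g, hg, rfl⟩ := hs
    rw [hitems, List.mem_map] at hg
    obtain ⟨c, hc, rfl⟩ := hg
    simp only [pvWr, List.mem_map] at hws
    obtain ⟨p, hp, rfl⟩ := hws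
    rw [PySem.List.mem_enumerate_iff] at hp
    obtain ⟨k, hk, rfl⟩ := hp
    obtain ⟨q, hq, he, hcq, hcnt⟩ := pvQ_rank c cs 0 k hk
    rw [List.getElem?_eq_getElem hk] at he
    have hgetk : (pvQ 0 cs c)[k] = ((q : Nat) : Int) := by
      simpa using Option.some.inj he
    have hcsq : cs[q]'hq = c := by
      rw [List.getElem?_eq_getElem hq] at hcq
      exact Option.some.inj hcq
    refine ⟨q, by simpa using hgetk, by rw [hr0]; exact hq, ?_⟩
    have hgd : cs.getD q ' ' = c := by
      rw [List.getD_eq_getElem cs ' ' hq, hcsq]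
    simp only [pvF, hgd, hcnt, pvLabel]
    norm_num
  have hcov : ∀ j : Nat, j < cs.length →
      ∃ w ∈ (((((PySem.List.enumerate cs 0).foldl
        (fun d p => d.modify p.2 ([] : List Int) (· ++ [p.1]))
        PySem.Dict.empty).items.map pvWr).flatten)), w.1 = (j : Int) := by
    intro j hj
    obtain ⟨k, hk, hkq⟩ := List.mem_iff_getElem.mp (pvQ_mem cs j hj)
    refine ⟨((pvQ 0 cs (cs[j]'hj))[k],
      if ((0 : Int) + (k : Nat)) = 0 then String.ofList [cs[j]'hj]
      else String.ofList ([cs[j]'hj] ++ '_' ::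
        (PySem.Int.toStr ((0 : Int) + (k : Nat))).toList)), ?_, by simpa using hkq⟩
    rw [List.mem_flatten]
    refine ⟨pvWr (cs[j]'hj, pvQ 0 cs (cs[j]'hj)), ?_, ?_⟩
    · rw [hitems]
      exact List.mem_map.2 ⟨(cs[j]'hj, pvQ 0 cs (cs[j]'hj)),
        List.mem_map.2 ⟨cs[j]'hj,
          (PySem.Set.mem_ofList cs _).2 (List.getElem_mem hj), rfl⟩, rfl⟩
    · simp only [pvWr, List.mem_map]
      exact ⟨((0 : Int) + (k : Nat), (pvQ 0 cs (cs[j]'hj))[k]),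
        (PySem.List.mem_enumerate_iff _ _ _).2 ⟨k, hk, rfl⟩, rfl⟩
  apply List.ext_getElem?_iff.mpr
  intro j
  by_cases hj : j < cs.length
  · rw [scatter_getElem? (pvF cs) _ _ hgood j (by rw [hr0]; exact hj)]
    rw [if_pos (hcov j hj)]
    rw [pvGo_getElem? cs [] j hj, List.nil_append]
    simp [pvF, List.getElem?_eq_getElem hj]
  · have h1 : (pvGo ([] : List Char) cs).length ≤ j := by rw [pvGo_length]; omega
    have h2 : ((((((PySem.List.enumerate cs 0).foldl
        (fun d p => d.modify p.2 ([] : List Int) (· ++ [p.1]))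
        PySem.Dict.empty).items.map pvWr).flatten)).foldl
        (fun r w => PySem.List.pySetD r w.1 w.2)
        (PySem.List.pyRepeat [""] ((cs.length : Int)))).length ≤ j := by
      rw [scatter_length, hr0]; omega
    rw [List.getElem?_eq_none h1, List.getElem?_eq_none h2]
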